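-- pv_equiv track=rewrite | github.com/BPRC-Bioinfo/VDJ-insights | scripts/VDJ_display.py | align_lists_by_matching
-- ===== SOURCE A (Python) =====
-- def align_lists_by_matching(list1, list2):
--     """
--     Aligns two lists by matching elements, inserting blanks for mismatches. This function compares two lists,
--     aligns matching elements, and inserts empty strings ("") where elements do not match.
--
--     Args:
--         list1 (list): First list to align.
--         list2 (list): Second list to align.
--
--     Returns:
--         aligned_list1 (list): Aligned versions of list 1.
--         aligned_list2 (list): Aligned versions of list 2.
--     """
--     aligned_list1, aligned_list2 = [], []
--     i, j = 0, 0
--     while i < len(list1) or j < len(list2):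
--         if i < len(list1) and j < len(list2):
--             if list1[i] == list2[j]:
--                 aligned_list1.append(list1[i])
--                 aligned_list2.append(list2[j])
--                 i += 1
--                 j += 1
--             else:
--                 if list1[i] in list2[j:]:
--                     aligned_list1.append("")
--                     aligned_list2.append(list2[j])
--                     j += 1
--                 elif list2[j] in list1[i:]:
--                     aligned_list1.append(list1[i])
--                     aligned_list2.append("")
--                     i += 1
--                 else:
--                     aligned_list1.append(list1[i])
--                     aligned_list2.append(list2[j])
--                     i += 1
--                     j += 1
--         elif i < len(list1):
--             aligned_list1.append(list1[i])
--             aligned_list2.append("")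
--             i += 1
--         elif j < len(list2):
--             aligned_list1.append("")
--             aligned_list2.append(list2[j])
--             j += 1
--     return aligned_list1, aligned_list2
-- ===== SOURCE B (Python) =====
-- def align_lists_by_matching(list1, list2):
--     # Occurrence-index maps + binary search: for each value, the sorted list of its
--     # positions; "does x occur in list2[j:] and where first" is answered by a
--     # bisect on occ2[x] instead of rescanning the suffix, and whole runs of gaps
--     # up to that first occurrence are emitted in one block.
--     occ1, occ2 = {}, {}
--     for k, v in enumerate(list1):
--         occ1.setdefault(v, []).append(k)
--     for k, v in enumerate(list2):
--         occ2.setdefault(v, []).append(k)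
--
--     def first_at_or_after(occ, v, p):
--         # first position >= p at which v occurs, or -1 (hand-written bisect_left)
--         idxs = occ.get(v)
--         if idxs is None:
--             return -1
--         lo, hi = 0, len(idxs)
--         while lo < hi:
--             mid = (lo + hi) // 2
--             if idxs[mid] < p:
--                 lo = mid + 1
--             else:
--                 hi = mid
--         return idxs[lo] if lo < len(idxs) else -1
--
--     a1, a2 = [], []
--     i, j = 0, 0
--     n1, n2 = len(list1), len(list2)
--     while i < n1 and j < n2:
--         x = list1[i]
--         k = first_at_or_after(occ2, x, j)
--         if k != -1:
--             # x reappears in list2 at k: gap-fill list1 up to there, then match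
--             a1 += [""] * (k - j) + [x]
--             a2 += list2[j:k + 1]
--             i, j = i + 1, k + 1
--         elif first_at_or_after(occ1, list2[j], i) != -1:
--             a1.append(x)
--             a2.append("")
--             i += 1
--         else:
--             a1.append(x)
--             a2.append(list2[j])
--             i, j = i + 1, j + 1
--     a1 += list1[i:] + [""] * (n2 - j)
--     a2 += [""] * (n1 - i) + list2[j:]
--     return a1, a2
-- ===== Notes on version B (the rewrite author's own statement) =====
-- stated objective: faster
-- what changed: replaces per-step suffix rescans with value-to-sorted-position-list maps queried by a hand-written bisect (first occurrence at-or-after a bound), emits whole gap runs up to that occurrence in one block (merging A's match and gap branches), and appends the unmatched tails after the loop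
import Mathlib
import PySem

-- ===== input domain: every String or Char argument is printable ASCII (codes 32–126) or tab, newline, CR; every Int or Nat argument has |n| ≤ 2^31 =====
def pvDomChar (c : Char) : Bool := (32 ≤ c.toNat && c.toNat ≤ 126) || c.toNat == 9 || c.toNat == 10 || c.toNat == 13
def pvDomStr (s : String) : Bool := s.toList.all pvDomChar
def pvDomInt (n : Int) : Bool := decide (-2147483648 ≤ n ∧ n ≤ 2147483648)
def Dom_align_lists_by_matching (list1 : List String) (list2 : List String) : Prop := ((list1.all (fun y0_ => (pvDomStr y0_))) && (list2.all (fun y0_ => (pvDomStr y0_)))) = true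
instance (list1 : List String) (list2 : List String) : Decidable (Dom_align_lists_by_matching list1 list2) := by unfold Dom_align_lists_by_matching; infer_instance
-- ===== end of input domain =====

-- B replaces A's per-step suffix rescans by value→sorted-occurrence-position maps
-- queried with a bisect, and emits each run of gaps up to the found occurrence in
-- one block; objective: faster (measured).

-- ===== PORT A =====
-- A's while loop, step for step; fuel = len l1 + len l2 is only a totality guard
-- (each iteration advances i or j, so the loop runs at most that often and the
-- fuel-0 case is never reached).  'list1[i] in list2[j:]' is membership in
-- 'l2.drop j', exact for the nonnegative in-range j the loop maintains.
def alignLoopA (l1 l2 : List String) : Nat → Nat → Nat → List String → List String →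
    List String × List String
  | 0, _, _, acc1, acc2 => (acc1, acc2)
  | fuel + 1, i, j, acc1, acc2 =>
    if i < l1.length ∨ j < l2.length then
      if h1 : i < l1.length then
        if h2 : j < l2.length then
          if l1[i] = l2[j] then
            alignLoopA l1 l2 fuel (i+1) (j+1) (acc1 ++ [l1[i]]) (acc2 ++ [l2[j]])
          else if l1[i] ∈ l2.drop j then
            alignLoopA l1 l2 fuel i (j+1) (acc1 ++ [""]) (acc2 ++ [l2[j]])
          else if l2[j] ∈ l1.drop i then
            alignLoopA l1 l2 fuel (i+1) j (acc1 ++ [l1[i]]) (acc2 ++ [""])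
          else
            alignLoopA l1 l2 fuel (i+1) (j+1) (acc1 ++ [l1[i]]) (acc2 ++ [l2[j]])
        else
          alignLoopA l1 l2 fuel (i+1) j (acc1 ++ [l1[i]]) (acc2 ++ [""])
      else if h2 : j < l2.length then
        alignLoopA l1 l2 fuel i (j+1) (acc1 ++ [""]) (acc2 ++ [l2[j]])
      else (acc1, acc2)
    else (acc1, acc2)

def align_lists_by_matching (list1 : List String) (list2 : List String) :
    List String × List String :=
  alignLoopA list1 list2 (list1.length + list2.length) 0 0 [] []

-- ===== PORT B =====
-- occ.setdefault(v, []).append(k): the dict maps each value to the list of its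
-- positions, in order (append in place = overwrite with the extended list).
def occMap (l : List String) : PySem.Dict String (List Int) :=
  (PySem.List.enumerate l).foldl
    (fun d kv => d.insert kv.2 (d.getD kv.2 [] ++ [kv.1])) PySem.Dict.empty

-- Source B's first_at_or_after; its hand-written lo/hi halving loop is exactly
-- bisect_left, ported as PySem.List.bisectLeft (the same lo/hi loop).
def firstAtOrAfter (occ : PySem.Dict String (List Int)) (v : String) (p : Int) : Int :=
  match occ.get? v with
  | none => -1
  | some idxs =>
      let lo := PySem.List.bisectLeft idxs p
      if lo < idxs.length then idxs.getD lo (-1) else -1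

-- B's while loop; the fuel-0 case (never reached: i advances every iteration)
-- carries B's post-loop tail concatenation, so running out of fuel and exiting
-- the loop coincide.
def alignLoopB (l1 l2 : List String) (occ1 occ2 : PySem.Dict String (List Int)) :
    Nat → Nat → Nat → List String → List String → List String × List String
  | 0, i, j, acc1, acc2 =>
    (acc1 ++ l1.drop i ++ List.replicate (l2.length - j) "",
     acc2 ++ List.replicate (l1.length - i) "" ++ l2.drop j)
  | fuel + 1, i, j, acc1, acc2 =>
    if h : i < l1.length ∧ j < l2.length then
      let x := l1[i]'h.1
      let k := firstAtOrAfter occ2 x (j : Int)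
      if k ≠ -1 then
        alignLoopB l1 l2 occ1 occ2 fuel (i+1) (k+1).toNat
          (acc1 ++ List.replicate (k - (j : Int)).toNat "" ++ [x])
          (acc2 ++ PySem.List.slice l2 (some (j : Int)) (some (k+1)))
      else if firstAtOrAfter occ1 (l2[j]'h.2) (i : Int) ≠ -1 then
        alignLoopB l1 l2 occ1 occ2 fuel (i+1) j (acc1 ++ [x]) (acc2 ++ [""])
      else
        alignLoopB l1 l2 occ1 occ2 fuel (i+1) (j+1) (acc1 ++ [x]) (acc2 ++ [l2[j]'h.2])
    else
      (acc1 ++ l1.drop i ++ List.replicate (l2.length - j) "",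
       acc2 ++ List.replicate (l1.length - i) "" ++ l2.drop j)

def align_lists_by_matching_alt (list1 : List String) (list2 : List String) :
    List String × List String :=
  alignLoopB list1 list2 (occMap list1) (occMap list2)
    (list1.length + list2.length) 0 0 [] []

-- ===== PRECONDITION & SPEC =====
def Spec_align_lists_by_matching (list1 : List String) (list2 : List String) (out : List String × List String) : Prop := out = align_lists_by_matching_alt list1 list2
instance (list1 : List String) (list2 : List String) (out : List String × List String) : Decidable (Spec_align_lists_by_matching list1 list2 out) := by unfold Spec_align_lists_by_matching; infer_instance

-- ===== CLAIM (what is proved, stated in full; the proofs are below) =====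
def Claim_equal_align_lists_by_matching : Prop := ∀ (list1 : List String) (list2 : List String), Dom_align_lists_by_matching list1 list2 → Spec_align_lists_by_matching list1 list2 (align_lists_by_matching list1 list2)

-- ===== LEMMAS AND PROOFS =====

-- The positions B's dict records for v, in order.
def idxsOf (l : List String) (v : String) : List Int :=
  ((PySem.List.enumerate l).filter (fun kv => kv.2 == v)).map (·.1)

theorem occMap_append (l : List String) (x : String) :
    occMap (l ++ [x]) = (occMap l).insert x ((occMap l).getD x [] ++ [(l.length : Int)]) := by
  simp [occMap, PySem.List.enumerate_append, PySem.List.enumerate_cons,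
    PySem.List.enumerate_nil, List.foldl_append]

theorem idxsOf_append (l : List String) (x v : String) :
    idxsOf (l ++ [x]) v = idxsOf l v ++ (if x = v then [(l.length : Int)] else []) := by
  simp [idxsOf, PySem.List.enumerate_append, PySem.List.enumerate_cons,
    PySem.List.enumerate_nil, List.filter_append]
  split_ifs with h <;> simp [h]

theorem occMap_get? (l : List String) (v : String) :
    (occMap l).get? v = if v ∈ l then some (idxsOf l v) else none := by
  induction l using List.reverseRecOn with
  | nil => simp [occMap, PySem.List.enumerate_nil, PySem.Dict.get?_empty]
  | append_singleton l x ih =>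
      rw [occMap_append]
      by_cases hv : v = x
      · subst hv
        rw [PySem.Dict.get?_insert_self, idxsOf_append]
        simp [PySem.Dict.getD, ih]
        split_ifs with h <;> simp [idxsOf]
        rintro a b hm rfl
        rcases (PySem.List.mem_enumerate_iff l 0 (a, b)).1 hm with ⟨k, hk, hp⟩
        rw [Prod.ext_iff] at hp; simp at hp
        exact h (hp.2 ▸ List.getElem_mem hk)
      · rw [PySem.Dict.get?_insert_of_ne _ _ hv, ih, idxsOf_append]
        simp [hv, Ne.symm hv]

theorem mem_idxsOf (l : List String) (v : String) (q : Int) :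
    q ∈ idxsOf l v ↔ ∃ (t : Nat) (_ : t < l.length), q = (t : Int) ∧ l[t] = v := by
  simp only [idxsOf, List.mem_map, List.mem_filter]
  constructor
  · rintro ⟨⟨a, b⟩, ⟨hm, hb⟩, rfl⟩
    rcases (PySem.List.mem_enumerate_iff l 0 (a, b)).1 hm with ⟨k, hk, hp⟩
    rw [Prod.ext_iff] at hp
    simp at hp hb
    exact ⟨k, hk, by simp [hp.1], by rw [← hp.2]; exact hb⟩
  · rintro ⟨t, ht, rfl, hv⟩
    exact ⟨((t : Int), l[t]), ⟨(PySem.List.mem_enumerate_iff l 0 _).2 ⟨t, ht, by simp⟩, by simp [hv]⟩, rfl⟩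

theorem pairwise_lt_idxsOf (l : List String) (v : String) :
    (idxsOf l v).Pairwise (· < ·) :=
  ((PySem.List.pairwise_lt_enumerate l 0).filter _).map _ (fun _ _ h => h)

theorem mem_drop_iff (l : List String) (p : Nat) (v : String) :
    v ∈ l.drop p ↔ ∃ (t : Nat) (_ : t < l.length), p ≤ t ∧ l[t] = v := by
  rw [List.mem_iff_getElem]
  constructor
  · rintro ⟨q, hq, rfl⟩
    exact ⟨p + q, by simp at hq; omega, by omega, (List.getElem_drop ..).symm⟩
  · rintro ⟨t, ht, hpt, rfl⟩
    exact ⟨t - p, by simp; omega, by rw [List.getElem_drop]; congr 1; omega⟩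

-- first_at_or_after = -1 exactly when v does not occur in l at or after p …
theorem faa_neg (l : List String) (v : String) (p : Nat)
    (h : firstAtOrAfter (occMap l) v (p : Int) = -1) : v ∉ l.drop p := by
  intro hmem
  have hvl : v ∈ l := List.mem_of_mem_drop hmem
  have hspec := PySem.List.bisectLeft_spec (idxsOf l v) (p : Int)
    ((pairwise_lt_idxsOf l v).imp le_of_lt)
  rw [firstAtOrAfter, occMap_get?, if_pos hvl] at h
  simp only at h
  rcases (mem_drop_iff l p v).1 hmem with ⟨t, ht, hpt, htv⟩
  have htm : ((t:Int)) ∈ idxsOf l v := (mem_idxsOf l v t).2 ⟨t, ht, rfl, htv⟩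
  rcases List.mem_iff_getElem.1 htm with ⟨q, hq, hqe⟩
  by_cases hlo : PySem.List.bisectLeft (idxsOf l v) (p:Int) < (idxsOf l v).length
  · rw [if_pos hlo, List.getD_eq_getElem _ _ hlo] at h
    have := List.getElem_mem hlo
    rw [h] at this
    rcases (mem_idxsOf l v (-1)).1 this with ⟨t', _, ht', _⟩
    omega
  · have hqlo : q < PySem.List.bisectLeft (idxsOf l v) (p:Int) := by omega
    have := hspec.2.1 q hq hqlo
    rw [hqe] at this
    omega

-- … and otherwise it returns the FIRST position ≥ p at which v occurs.
theorem faa_pos (l : List String) (v : String) (p : Nat)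
    (h : firstAtOrAfter (occMap l) v (p : Int) ≠ -1) :
    ∃ (t : Nat) (_ : t < l.length),
      firstAtOrAfter (occMap l) v (p : Int) = (t : Int) ∧ p ≤ t ∧ l[t] = v ∧
      ∀ u, p ≤ u → ∀ (_ : u < l.length), u < t → l[u] ≠ v := by
  have hvl : v ∈ l := by
    by_contra hv
    rw [firstAtOrAfter, occMap_get?, if_neg hv] at h
    exact h rfl
  have hspec := PySem.List.bisectLeft_spec (idxsOf l v) (p : Int)
    ((pairwise_lt_idxsOf l v).imp le_of_lt)
  rw [firstAtOrAfter, occMap_get?, if_pos hvl] at h ⊢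
  simp only at h ⊢
  by_cases hlo : PySem.List.bisectLeft (idxsOf l v) (p:Int) < (idxsOf l v).length
  · rw [if_pos hlo, List.getD_eq_getElem _ _ hlo] at h ⊢
    have hm := List.getElem_mem hlo
    rcases (mem_idxsOf l v _).1 hm with ⟨t, ht, hte, htv⟩
    refine ⟨t, ht, hte, ?_, htv, ?_⟩
    · have := hspec.2.2 _ hlo le_rfl
      omega
    · intro u hpu hu hut huv
      have hum : ((u:Int)) ∈ idxsOf l v := (mem_idxsOf l v u).2 ⟨u, hu, rfl, huv⟩
      rcases List.mem_iff_getElem.1 hum with ⟨q, hq, hqe⟩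
      rcases lt_trichotomy q (PySem.List.bisectLeft (idxsOf l v) (p:Int)) with hq1 | hq1 | hq1
      · have := hspec.2.1 q hq hq1
        rw [hqe] at this; omega
      · have : (idxsOf l v)[q]'hq = (idxsOf l v)[PySem.List.bisectLeft (idxsOf l v) (p:Int)]'hlo := by
          simp [hq1]
        rw [hqe, hte] at this; omega
      · have := List.pairwise_iff_getElem.1 (pairwise_lt_idxsOf l v) _ _ hlo hq hq1
        rw [hqe, hte] at this; omega
  · rw [if_neg hlo] at h
    exact absurd rfl h

-- Loop-exit and single-step unfolding lemmas for the two loops.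
theorem loopA_exit (l1 l2 : List String) (fuel i j : Nat) (acc1 acc2 : List String)
    (h1 : l1.length ≤ i) (h2 : l2.length ≤ j) :
    alignLoopA l1 l2 fuel i j acc1 acc2 = (acc1, acc2) := by
  cases fuel with
  | zero => rfl
  | succ fuel => rw [alignLoopA, if_neg (by omega)]

theorem loopB_exit (l1 l2 : List String) (occ1 occ2 : PySem.Dict String (List Int))
    (fuel i j : Nat) (acc1 acc2 : List String)
    (h : ¬ (i < l1.length ∧ j < l2.length)) :
    alignLoopB l1 l2 occ1 occ2 fuel i j acc1 acc2 =
      (acc1 ++ l1.drop i ++ List.replicate (l2.length - j) "",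
       acc2 ++ List.replicate (l1.length - i) "" ++ l2.drop j) := by
  cases fuel with
  | zero => rfl
  | succ fuel => rw [alignLoopB, dif_neg h]

theorem loopB_step_skip (l1 l2 : List String) (occ1 occ2 : PySem.Dict String (List Int))
    (fuel i j : Nat) (acc1 acc2 : List String) (h1 : i < l1.length) (h2 : j < l2.length)
    (hk : firstAtOrAfter occ2 (l1[i]) (j : Int) ≠ -1) :
    alignLoopB l1 l2 occ1 occ2 (fuel+1) i j acc1 acc2 =
      alignLoopB l1 l2 occ1 occ2 fuel (i+1) ((firstAtOrAfter occ2 (l1[i]) (j : Int))+1).toNat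
        (acc1 ++ List.replicate ((firstAtOrAfter occ2 (l1[i]) (j : Int)) - (j : Int)).toNat "" ++ [l1[i]])
        (acc2 ++ PySem.List.slice l2 (some (j : Int)) (some ((firstAtOrAfter occ2 (l1[i]) (j : Int))+1))) := by
  rw [alignLoopB, dif_pos ⟨h1, h2⟩]
  simp only [if_pos hk]

theorem loopB_step_gap2 (l1 l2 : List String) (occ1 occ2 : PySem.Dict String (List Int))
    (fuel i j : Nat) (acc1 acc2 : List String) (h1 : i < l1.length) (h2 : j < l2.length)
    (hk : firstAtOrAfter occ2 (l1[i]) (j : Int) = -1)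
    (hy : firstAtOrAfter occ1 (l2[j]) (i : Int) ≠ -1) :
    alignLoopB l1 l2 occ1 occ2 (fuel+1) i j acc1 acc2 =
      alignLoopB l1 l2 occ1 occ2 fuel (i+1) j (acc1 ++ [l1[i]]) (acc2 ++ [""]) := by
  rw [alignLoopB, dif_pos ⟨h1, h2⟩]
  simp [hk, hy]

theorem loopB_step_sub (l1 l2 : List String) (occ1 occ2 : PySem.Dict String (List Int))
    (fuel i j : Nat) (acc1 acc2 : List String) (h1 : i < l1.length) (h2 : j < l2.length)
    (hk : firstAtOrAfter occ2 (l1[i]) (j : Int) = -1)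
    (hy : firstAtOrAfter occ1 (l2[j]) (i : Int) = -1) :
    alignLoopB l1 l2 occ1 occ2 (fuel+1) i j acc1 acc2 =
      alignLoopB l1 l2 occ1 occ2 fuel (i+1) (j+1) (acc1 ++ [l1[i]]) (acc2 ++ [l2[j]]) := by
  rw [alignLoopB, dif_pos ⟨h1, h2⟩]
  simp [hk, hy]

-- A's stepwise gap run: when l1[i] first reappears in l2 at j+d, A spends d
-- blank-steps and one match-step to reach (i+1, j+d+1).
theorem skipA (l1 l2 : List String) (i : Nat) (hi : i < l1.length) :
    ∀ (d j f : Nat) (acc1 acc2 : List String) (hd : j + d < l2.length),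
      l2[j + d] = l1[i] →
      (∀ t (_ : t < l2.length), j ≤ t → t < j + d → l2[t] ≠ l1[i]) →
      alignLoopA l1 l2 (f + d + 1) i j acc1 acc2 =
        alignLoopA l1 l2 f (i+1) (j+d+1)
          (acc1 ++ List.replicate d "" ++ [l1[i]])
          (acc2 ++ (l2.drop j).take (d+1)) := by
  intro d
  induction d with
  | zero =>
      intro j f acc1 acc2 hd heq _
      have hj : j < l2.length := by omega
      have heq0 : l2[j] = l1[i] := by simpa using heq
      rw [alignLoopA, if_pos (Or.inl hi), dif_pos hi, dif_pos hj, if_pos heq0.symm]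
      rw [List.drop_eq_getElem_cons hj]
      simp [heq0]
  | succ d ih =>
      intro j f acc1 acc2 hd heq hmin
      have hj : j < l2.length := by omega
      have hne : ¬ (l1[i] = l2[j]) := by
        intro he
        exact hmin j hj le_rfl (by omega) he.symm
      have hmem : l1[i] ∈ l2.drop j :=
        (mem_drop_iff l2 j _).2 ⟨j + (d+1), hd, by omega, heq⟩
      have : f + (d + 1) + 1 = (f + d + 1) + 1 := by omega
      rw [this, alignLoopA, if_pos (Or.inl hi), dif_pos hi, dif_pos hj,
        if_neg hne, if_pos hmem]
      have hd' : (j+1) + d < l2.length := by omega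
      have heq' : l2[(j+1) + d] = l1[i] := by
        have : (j+1) + d = j + (d+1) := by omega
        simp_rw [this]; exact heq
      rw [ih (j+1) f (acc1 ++ [""]) (acc2 ++ [l2[j]]) hd'
        heq' (fun t ht ht1 ht2 => hmin t ht (by omega) (by omega))]
      have h1 : j + 1 + d + 1 = j + (d + 1) + 1 := by omega
      have h2 : (acc1 ++ [""]) ++ List.replicate d "" ++ [l1[i]]
          = acc1 ++ List.replicate (d+1) "" ++ [l1[i]] := by
        simp [List.replicate_succ]
      have h3 : (acc2 ++ [l2[j]]) ++ (l2.drop (j+1)).take (d+1)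
          = acc2 ++ (l2.drop j).take (d+1+1) := by
        rw [List.drop_eq_getElem_cons hj, List.take_succ_cons]
        simp
      rw [h1, h2, h3]

-- A's loop equals B's loop on every sufficiently fuelled state.
theorem loopA_eq_loopB (l1 l2 : List String) :
    ∀ (m : Nat), ∀ (i j : Nat) (acc1 acc2 : List String) (fA fB : Nat),
      (l1.length - i) + (l2.length - j) ≤ m →
      (l1.length - i) + (l2.length - j) ≤ fA →
      (l1.length - i) + (l2.length - j) ≤ fB →
      alignLoopA l1 l2 fA i j acc1 acc2 =
        alignLoopB l1 l2 (occMap l1) (occMap l2) fB i j acc1 acc2 := by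
  intro m
  induction m with
  | zero =>
      intro i j acc1 acc2 fA fB hm _ _
      rw [loopA_exit l1 l2 fA i j acc1 acc2 (by omega) (by omega),
        loopB_exit _ _ _ _ fB i j acc1 acc2 (by omega)]
      rw [List.drop_eq_nil_of_le (by omega), List.drop_eq_nil_of_le (by omega),
        Nat.sub_eq_zero_of_le (by omega), Nat.sub_eq_zero_of_le (by omega)]
      simp
  | succ m ih =>
      intro i j acc1 acc2 fA fB hm hfA hfB
      by_cases h1 : i < l1.length
      · by_cases h2 : j < l2.length
        · obtain ⟨fa, rfl⟩ : ∃ fa, fA = fa + 1 := ⟨fA - 1, by omega⟩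
          obtain ⟨fb, rfl⟩ : ∃ fb, fB = fb + 1 := ⟨fB - 1, by omega⟩
          by_cases hk : firstAtOrAfter (occMap l2) (l1[i]) (j:Int) = -1
          · have hxnm : l1[i] ∉ l2.drop j := faa_neg l2 _ j hk
            have hne : ¬ (l1[i] = l2[j]) := fun he =>
              hxnm ((mem_drop_iff l2 j _).2 ⟨j, h2, le_rfl, he.symm⟩)
            rw [alignLoopA, if_pos (Or.inl h1), dif_pos h1, dif_pos h2,
              if_neg hne, if_neg hxnm]
            by_cases hy : firstAtOrAfter (occMap l1) (l2[j]) (i:Int) = -1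
            · have hynm : l2[j] ∉ l1.drop i := faa_neg l1 _ i hy
              rw [if_neg hynm, loopB_step_sub l1 l2 _ _ fb i j acc1 acc2 h1 h2 hk hy]
              exact ih (i+1) (j+1) _ _ fa fb (by omega) (by omega) (by omega)
            · rcases faa_pos l1 _ i hy with ⟨t, ht, _, hit, htv, _⟩
              have hym : l2[j] ∈ l1.drop i := (mem_drop_iff l1 i _).2 ⟨t, ht, hit, htv⟩
              rw [if_pos hym, loopB_step_gap2 l1 l2 _ _ fb i j acc1 acc2 h1 h2 hk hy]
              exact ih (i+1) j _ _ fa fb (by omega) (by omega) (by omega)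
          · rcases faa_pos l2 _ j hk with ⟨t, ht, hres, hjt, htv, hmin⟩
            have hjd : j + (t - j) = t := by omega
            have hfa : fa + 1 = (fa - (t - j)) + (t - j) + 1 := by omega
            have heq : l2[j + (t - j)]'(by omega) = l1[i] := by
              simp_rw [hjd]; exact htv
            rw [hfa, skipA l1 l2 i h1 (t - j) j (fa - (t - j)) acc1 acc2 (by omega) heq
              (fun u hu hju hud => hmin u hju hu (by omega))]
            rw [loopB_step_skip l1 l2 _ _ fb i j acc1 acc2 h1 h2 hk, hres]
            have e1 : (((t:Int))+1).toNat = t + 1 := by omega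
            have e2 : ((t:Int) - (j:Int)).toNat = t - j := by omega
            have e3 : PySem.List.slice l2 (some (j:Int)) (some ((t:Int)+1))
                = (l2.drop j).take ((t - j)+1) := by
              have hcast : ((t:Int)+1) = ((t+1 : Nat) : Int) := by push_cast; ring
              rw [hcast, PySem.List.slice_natCast]
              congr 1
              omega
            rw [e1, e2, e3]
            have hjd1 : j + (t - j) + 1 = t + 1 := by omega
            rw [hjd1]
            exact ih (i+1) (t+1) _ _ (fa - (t - j)) fb (by omega) (by omega) (by omega)
        · obtain ⟨fa, rfl⟩ : ∃ fa, fA = fa + 1 := ⟨fA - 1, by omega⟩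
          rw [alignLoopA, if_pos (Or.inl h1), dif_pos h1, dif_neg h2]
          rw [ih (i+1) j _ _ fa fB (by omega) (by omega) (by omega)]
          rw [loopB_exit _ _ _ _ fB (i+1) j _ _ (by omega),
            loopB_exit _ _ _ _ fB i j acc1 acc2 (by omega)]
          rw [List.drop_eq_getElem_cons h1]
          have : l1.length - i = (l1.length - (i+1)) + 1 := by omega
          rw [this, List.replicate_succ]
          simp
      · by_cases h2 : j < l2.length
        · obtain ⟨fa, rfl⟩ : ∃ fa, fA = fa + 1 := ⟨fA - 1, by omega⟩
          rw [alignLoopA, if_pos (Or.inr h2), dif_neg h1, dif_pos h2]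
          rw [ih i (j+1) _ _ fa fB (by omega) (by omega) (by omega)]
          rw [loopB_exit _ _ _ _ fB i (j+1) _ _ (by omega),
            loopB_exit _ _ _ _ fB i j acc1 acc2 (by omega)]
          rw [List.drop_eq_getElem_cons h2]
          have : l2.length - j = (l2.length - (j+1)) + 1 := by omega
          rw [this, List.replicate_succ,
            List.drop_eq_nil_of_le (show l1.length ≤ i by omega),
            Nat.sub_eq_zero_of_le (show l1.length ≤ i by omega)]
          simp
        · rw [loopA_exit l1 l2 fA i j acc1 acc2 (by omega) (by omega),
            loopB_exit _ _ _ _ fB i j acc1 acc2 (by omega)]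
          rw [List.drop_eq_nil_of_le (by omega), List.drop_eq_nil_of_le (by omega),
            Nat.sub_eq_zero_of_le (by omega), Nat.sub_eq_zero_of_le (by omega)]
          simp

-- ===== VERDICT (by name: the statement is the Claim_ definition above) =====
theorem align_lists_by_matching_spec : Claim_equal_align_lists_by_matching := by
  intro l1 l2 _
  unfold Spec_align_lists_by_matching align_lists_by_matching align_lists_by_matching_alt
  exact loopA_eq_loopB l1 l2 (l1.length + l2.length) 0 0 [] []
    (l1.length + l2.length) (l1.length + l2.length) (by omega) (by omega) (by omega)
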